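-- pv_equiv track=rewrite | github.com/Zane361/homework | 4-dars.py | vowel_checker
-- ===== SOURCE A (Python) =====
-- def vowel_checker(first:str, second:str) -> bool:
--     vowels = ''
--     if 'a' in second:
--         vowels += 'a'
--     if 'e' in second:
--         vowels += 'e'
--     if 'u' in second:
--         vowels += 'u'
--     if 'i' in second:
--         vowels += 'i'
--     if 'o' in second:
--         vowels += 'o'
--     for i in first:
--         if i in 'aeoui':
--             if i not in vowels:
--                 return False
--     return True
-- ===== SOURCE B (Python) =====
-- def vowel_checker(first: str, second: str) -> bool:
--     # Iterate over the five vowels (not over first's characters): each vowel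
--     # occurring in first must also occur in second.
--     return all(v not in first or v in second for v in "aeiou")
-- ===== Notes on version B (the rewrite author's own statement) =====
-- stated objective: simpler
-- what changed: Inverts the traversal: instead of A's populate-a-vowels-string pass plus a char-by-char early-return scan of first, B loops over the five vowels themselves and checks for each the implication 'in first -> in second' with a single all(...) expression; the per-character Python-level loop over first disappears (membership scans run in C).
import Mathlib
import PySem

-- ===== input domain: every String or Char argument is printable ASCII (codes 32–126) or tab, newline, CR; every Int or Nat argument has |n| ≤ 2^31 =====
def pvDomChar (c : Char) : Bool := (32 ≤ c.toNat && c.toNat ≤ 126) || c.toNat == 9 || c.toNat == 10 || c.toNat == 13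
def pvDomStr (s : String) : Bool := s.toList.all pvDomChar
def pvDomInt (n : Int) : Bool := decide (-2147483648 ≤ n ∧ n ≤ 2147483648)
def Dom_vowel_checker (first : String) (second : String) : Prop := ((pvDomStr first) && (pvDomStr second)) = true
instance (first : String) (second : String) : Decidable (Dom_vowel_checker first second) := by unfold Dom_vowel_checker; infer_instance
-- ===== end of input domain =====

-- B inverts the traversal: it loops over the five vowels and checks 'in first -> in second'
-- for each, instead of A's vowel-string accumulation plus early-return scan of first (simpler).


-- ===== PORT A =====
-- the five 'if <v> in second: vowels += <v>' statements
def vowelsOf (s2 : List Char) : List Char :=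
  let vowels : List Char := []
  let vowels := if s2.contains 'a' then vowels ++ ['a'] else vowels
  let vowels := if s2.contains 'e' then vowels ++ ['e'] else vowels
  let vowels := if s2.contains 'u' then vowels ++ ['u'] else vowels
  let vowels := if s2.contains 'i' then vowels ++ ['i'] else vowels
  if s2.contains 'o' then vowels ++ ['o'] else vowels

-- the loop "for i in first: if i in 'aeoui': if i not in vowels: return False" / "return True"
def vowelCheckerLoop (l : List Char) (vowels : List Char) : Bool :=
  match l with
  | [] => true
  | i :: rest =>
    if ['a','e','o','u','i'].contains i then
      if !(vowels.contains i) then false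
      else vowelCheckerLoop rest vowels
    else vowelCheckerLoop rest vowels

def vowel_checker (first : String) (second : String) : Bool :=
  vowelCheckerLoop first.toList (vowelsOf second.toList)

-- ===== PORT B =====
-- all(v not in first or v in second for v in "aeiou")
def vowel_checker_alt (first : String) (second : String) : Bool :=
  "aeiou".toList.all (fun v => !(first.toList.contains v) || second.toList.contains v)

-- ===== PRECONDITION & SPEC =====
def Spec_vowel_checker (first : String) (second : String) (out : Bool) : Prop := out = vowel_checker_alt first second
instance (first : String) (second : String) (out : Bool) : Decidable (Spec_vowel_checker first second out) := by unfold Spec_vowel_checker; infer_instance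

-- ===== CLAIM (what is proved, stated in full; the proofs are below) =====
def Claim_equal_vowel_checker : Prop := ∀ (first : String) (second : String), Dom_vowel_checker first second → Spec_vowel_checker first second (vowel_checker first second)

-- ===== LEMMAS AND PROOFS =====

lemma vlists (c : Char) : c ∈ ['a','e','o','u','i'] ↔ c ∈ ['a','e','i','o','u'] := by
  simp only [List.mem_cons, List.not_mem_nil, or_false]
  tauto

lemma mem_ite_append (p : Prop) [Decidable p] (v : List Char) (x c : Char) :
    (c ∈ if p then v ++ [x] else v) ↔ c ∈ v ∨ (c = x ∧ p) := by
  split_ifs with h <;> simp [h]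

lemma mem_vowelsOf (s2 : List Char) (c : Char) (hc : c ∈ ['a','e','o','u','i']) :
    c ∈ vowelsOf s2 ↔ c ∈ s2 := by
  unfold vowelsOf
  simp only [List.contains_iff_mem, mem_ite_append, List.not_mem_nil, false_or]
  fin_cases hc <;> simp

lemma alt_iff (first second : String) :
    vowel_checker_alt first second = true ↔
      ∀ v ∈ ['a','e','i','o','u'], v ∈ first.toList → v ∈ second.toList := by
  have haei : ("aeiou".toList) = ['a','e','i','o','u'] := rfl
  unfold vowel_checker_alt
  rw [haei, List.all_eq_true]
  constructor
  · intro h v hv hf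
    have := h v hv
    simp only [Bool.or_eq_true, Bool.not_eq_true', List.contains_iff_mem] at this
    rcases this with h1 | h2
    · exact absurd hf (by simpa using h1)
    · exact h2
  · intro h v hv
    simp only [Bool.or_eq_true, Bool.not_eq_true', List.contains_iff_mem]
    by_cases hf : v ∈ first.toList
    · exact Or.inr (h v hv hf)
    · exact Or.inl (by simpa using hf)

lemma loop_iff (l vowels : List Char) :
    vowelCheckerLoop l vowels = true ↔
      ∀ c ∈ l, c ∈ ['a','e','o','u','i'] → c ∈ vowels := by
  induction l with
  | nil => simp [vowelCheckerLoop]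
  | cons i rest ih =>
    simp only [vowelCheckerLoop]
    by_cases hv : i ∈ ['a','e','o','u','i']
    · rw [if_pos (List.contains_iff_mem.2 hv)]
      by_cases hw : i ∈ vowels
      · rw [List.contains_iff_mem.2 hw]
        simp only [Bool.not_true, Bool.false_eq_true, if_false, ih, List.forall_mem_cons]
        exact (and_iff_right (fun _ => hw)).symm
      · have : vowels.contains i = false := by
          simp [hw]
        rw [this]
        simp only [Bool.not_false, if_true, List.forall_mem_cons]
        constructor
        · intro h; cases h
        · intro h; exact absurd (h.1 hv) hw
    · have : (['a','e','o','u','i'].contains i) = false := by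
        simp [hv]
      rw [this]
      simp only [Bool.false_eq_true, if_false, ih, List.forall_mem_cons]
      exact (and_iff_right (fun h => absurd h hv)).symm

-- ===== VERDICT (by name: the statement is the Claim_ definition above) =====
theorem vowel_checker_spec : Claim_equal_vowel_checker := by
  intro first second _
  unfold Spec_vowel_checker vowel_checker
  rw [Bool.eq_iff_iff, loop_iff, alt_iff]
  constructor
  · intro h v hv hf
    exact (mem_vowelsOf _ v ((vlists v).2 hv)).1 (h v hf ((vlists v).2 hv))
  · intro h c hc hv
    exact (mem_vowelsOf _ c hv).2 (h c ((vlists c).1 hv) hc)
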